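-- pv_equiv track=rewrite | github.com/seanbarlow/doit | tests/utils/macos/unicode_utils.py | find_unicode_differences
-- ===== SOURCE A (Python) =====
-- from typing import List, Tuple, Optional
--
-- def find_unicode_differences(text1: str, text2: str) -> List[Tuple[int, str, str]]:
--     """Find positions where two strings differ in Unicode normalization.
--
--     Args:
--         text1: First string
--         text2: Second string
--
--     Returns:
--         List of tuples (position, char1, char2) where strings differ
--     """
--     differences = []
--
--     # Normalize to same length for comparison
--     max_len = max(len(text1), len(text2))
--
--     for i in range(max_len):
--         char1 = text1[i] if i < len(text1) else ""
--         char2 = text2[i] if i < len(text2) else ""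
--
--         if char1 != char2:
--             differences.append((i, char1, char2))
--
--     return differences
-- ===== SOURCE B (Python) =====
-- from typing import List, Tuple, Optional
--
-- def find_unicode_differences(text1: str, text2: str) -> List[Tuple[int, str, str]]:
--     """Find positions where two strings differ (two disjoint passes:
--     common prefix compared pairwise, then the tail of the longer string)."""
--     min_len = min(len(text1), len(text2))
--     diffs = [(i, text1[i], text2[i]) for i in range(min_len) if text1[i] != text2[i]]
--     if len(text1) > len(text2):
--         diffs.extend((i, text1[i], "") for i in range(min_len, len(text1)))
--     elif len(text2) > len(text1):
--         diffs.extend((i, "", text2[i]) for i in range(min_len, len(text2)))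
--     return diffs
-- ===== Notes on version B (the rewrite author's own statement) =====
-- stated objective: alternative
-- what changed: A runs one loop to max(len) with per-index bounds tests producing empty-string placeholders; B splits the work into a comprehension over the common prefix comparing characters directly plus a separate tail pass over the longer string's remainder, with no per-index bounds tests.
import Mathlib
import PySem

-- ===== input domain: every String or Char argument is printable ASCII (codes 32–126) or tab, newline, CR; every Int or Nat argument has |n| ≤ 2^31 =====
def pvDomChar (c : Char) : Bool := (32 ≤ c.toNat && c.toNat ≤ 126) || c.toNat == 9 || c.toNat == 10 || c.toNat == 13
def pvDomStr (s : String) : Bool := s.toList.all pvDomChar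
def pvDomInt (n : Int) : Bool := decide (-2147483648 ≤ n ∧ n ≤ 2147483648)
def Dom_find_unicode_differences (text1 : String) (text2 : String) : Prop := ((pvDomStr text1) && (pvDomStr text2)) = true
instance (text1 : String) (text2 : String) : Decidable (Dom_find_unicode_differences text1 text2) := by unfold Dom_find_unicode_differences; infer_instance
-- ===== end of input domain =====

-- B replaces A's single max-length loop with per-index bounds tests by two disjoint
-- passes: a comprehension over the common prefix plus a tail pass over the longer
-- string's remainder (objective: alternative decomposition, same cost).

-- ===== PORT A =====
-- single loop over range(max_len); each index tests both bounds, "" as placeholder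
def find_unicode_differences (text1 : String) (text2 : String) : List (Int × String × String) :=
  let l1 := text1.toList
  let l2 := text2.toList
  let maxLen := max l1.length l2.length
  (List.range maxLen).foldl (fun acc i =>
    let c1 : String := if i < l1.length then String.ofList [l1.getD i ' '] else ""
    let c2 : String := if i < l2.length then String.ofList [l2.getD i ' '] else ""
    if c1 ≠ c2 then acc ++ [((i : Int), c1, c2)] else acc) []

-- ===== PORT B =====
-- comprehension over the common prefix, then a tail pass over the longer remainder
def find_unicode_differences_alt (text1 : String) (text2 : String) : List (Int × String × String) :=
  let l1 := text1.toList
  let l2 := text2.toList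
  let m := min l1.length l2.length
  let diffs := (List.range m).filterMap (fun i : Nat =>
    if l1.getD i ' ' ≠ l2.getD i ' ' then
      some ((i : Int), String.ofList [l1.getD i ' '], String.ofList [l2.getD i ' '])
    else none)
  if l2.length < l1.length then
    diffs ++ (List.range' m (l1.length - m)).map
      (fun i : Nat => ((i : Int), String.ofList [l1.getD i ' '], ""))
  else if l1.length < l2.length then
    diffs ++ (List.range' m (l2.length - m)).map
      (fun i : Nat => ((i : Int), "", String.ofList [l2.getD i ' ']))
  else diffs

-- ===== PRECONDITION & SPEC =====
def Spec_find_unicode_differences (text1 : String) (text2 : String) (out : List (Int × String × String)) : Prop := out = find_unicode_differences_alt text1 text2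
instance (text1 : String) (text2 : String) (out : List (Int × String × String)) : Decidable (Spec_find_unicode_differences text1 text2 out) := by unfold Spec_find_unicode_differences; infer_instance

-- ===== CLAIM (what is proved, stated in full; the proofs are below) =====
def Claim_equal_find_unicode_differences : Prop := ∀ (text1 : String) (text2 : String), Dom_find_unicode_differences text1 text2 → Spec_find_unicode_differences text1 text2 (find_unicode_differences text1 text2)

-- ===== LEMMAS AND PROOFS =====

-- singleton strings are equal iff their characters are
theorem pv_ofList_singleton_inj (a b : Char) :
    (String.ofList [a] = String.ofList [b]) ↔ a = b := by
  constructor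
  · intro he
    have h2 := congrArg String.toList he
    simpa using h2
  · intro he; rw [he]

-- range(M) splits into range(m) ++ range'(m, M-m) for m ≤ M
theorem pv_range_split (a b : Nat) (h : b ≤ a) :
    List.range a = List.range b ++ List.range' b (a - b) := by
  have h2 := List.range'_append (s := 0) (m := b) (n := a - b) (step := 1)
  simp only [Nat.zero_add, Nat.one_mul] at h2
  rw [List.range_eq_range', List.range_eq_range', h2]
  congr 1
  omega

-- a filter-then-map pass is the same as one filterMap pass
theorem pv_map_filter_eq_filterMap {α β : Type} (p : α → Prop) [DecidablePred p]
    (f : α → β) (l : List α) :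
    (l.filter (fun x => decide (p x))).map f
      = l.filterMap (fun x => if p x then some (f x) else none) := by
  induction l with
  | nil => rfl
  | cons x xs ih =>
      by_cases h : p x
      · simp [h, ih]
      · simp [h, ih]

-- A's filtered singleton-string comparison over the common prefix equals B's filterMap
theorem pv_common (l1 l2 : List Char) (m : Nat) (hm : m = min l1.length l2.length) :
    (List.range m).foldl (fun acc i =>
      let c1 : String := if i < l1.length then String.ofList [l1.getD i ' '] else ""
      let c2 : String := if i < l2.length then String.ofList [l2.getD i ' '] else ""
      if c1 ≠ c2 then acc ++ [((i : Int), c1, c2)] else acc) []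
    = (List.range m).filterMap (fun i : Nat =>
      if l1.getD i ' ' ≠ l2.getD i ' ' then
        some ((i : Int), String.ofList [l1.getD i ' '], String.ofList [l2.getD i ' '])
      else none) := by
  rw [PySem.List.foldl_congr_mem (g := fun acc i =>
      if l1.getD i ' ' ≠ l2.getD i ' ' then
        acc ++ [((i : Int), String.ofList [l1.getD i ' '], String.ofList [l2.getD i ' '])]
      else acc)]
  · rw [PySem.List.foldl_append_ite]
    simp only [List.nil_append]
    exact pv_map_filter_eq_filterMap _ _ _
  · intro acc i hi
    have him : i < m := List.mem_range.mp hi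
    have h1 : i < l1.length := by omega
    have h2 : i < l2.length := by omega
    simp only [if_pos h1, if_pos h2]
    simp [pv_ofList_singleton_inj]

-- A's tail loop (one side out of range) appends every element: it is a map
theorem pv_tail1 (acc0 : List (Int × String × String)) (l1 l2 : List Char) (m k : Nat)
    (hm : m = l2.length) (hk : m + k ≤ l1.length) :
    (List.range' m k).foldl (fun acc i =>
      let c1 : String := if i < l1.length then String.ofList [l1.getD i ' '] else ""
      let c2 : String := if i < l2.length then String.ofList [l2.getD i ' '] else ""
      if c1 ≠ c2 then acc ++ [((i : Int), c1, c2)] else acc) acc0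
    = acc0 ++ (List.range' m k).map (fun i : Nat =>
        ((i : Int), (if i < l1.length then String.ofList [l1.getD i ' '] else ""), "")) := by
  rw [PySem.List.foldl_congr_mem (g := fun (acc : List (Int × String × String)) (i : Nat) =>
      acc ++ [((i : Int), (if i < l1.length then String.ofList [l1.getD i ' '] else ""), ("" : String))])]
  · exact PySem.List.foldl_append_singleton_eq_map _ _ _
  · intro acc i hi
    have h2 : ¬ i < l2.length := by
      have := (List.mem_range'_1.mp hi).1; omega
    simp only [if_neg h2]
    by_cases h1 : i < l1.length
    · simp only [if_pos h1]
      have hne : String.ofList [l1.getD i ' '] ≠ "" := by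
        intro h; simpa using congrArg String.toList h
      simp only [ne_eq, hne, not_false_iff, if_pos]
    · exact absurd (List.mem_range'_1.mp hi).2 (by omega)

theorem pv_tail2 (acc0 : List (Int × String × String)) (l1 l2 : List Char) (m k : Nat)
    (hm : m = l1.length) (hk : m + k ≤ l2.length) :
    (List.range' m k).foldl (fun acc i =>
      let c1 : String := if i < l1.length then String.ofList [l1.getD i ' '] else ""
      let c2 : String := if i < l2.length then String.ofList [l2.getD i ' '] else ""
      if c1 ≠ c2 then acc ++ [((i : Int), c1, c2)] else acc) acc0
    = acc0 ++ (List.range' m k).map (fun i : Nat =>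
        ((i : Int), "", (if i < l2.length then String.ofList [l2.getD i ' '] else ""))) := by
  rw [PySem.List.foldl_congr_mem (g := fun (acc : List (Int × String × String)) (i : Nat) =>
      acc ++ [((i : Int), ("" : String), (if i < l2.length then String.ofList [l2.getD i ' '] else ""))])]
  · exact PySem.List.foldl_append_singleton_eq_map _ _ _
  · intro acc i hi
    have h1 : ¬ i < l1.length := by
      have := (List.mem_range'_1.mp hi).1; omega
    simp only [if_neg h1]
    by_cases h2 : i < l2.length
    · simp only [if_pos h2]
      have hne : ("" : String) ≠ String.ofList [l2.getD i ' '] := by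
        intro h; simpa using congrArg String.toList h
      simp only [ne_eq, hne, not_false_iff, if_pos]
    · exact absurd (List.mem_range'_1.mp hi).2 (by omega)

-- ===== VERDICT (by name: the statement is the Claim_ definition above) =====
theorem find_unicode_differences_spec : Claim_equal_find_unicode_differences := by
  intro text1 text2 _
  unfold Spec_find_unicode_differences find_unicode_differences find_unicode_differences_alt
  set l1 := text1.toList with hl1
  set l2 := text2.toList with hl2
  simp only []
  have hsplit : List.range (max l1.length l2.length)
      = List.range (min l1.length l2.length)
        ++ List.range' (min l1.length l2.length)
             (max l1.length l2.length - min l1.length l2.length) :=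
    pv_range_split _ _ (min_le_max)
  rw [hsplit, List.foldl_append]
  rw [pv_common l1 l2 _ rfl]
  by_cases hgt : l2.length < l1.length
  · rw [if_pos hgt]
    have hmin : min l1.length l2.length = l2.length := by omega
    rw [pv_tail1 _ l1 l2 _ _ hmin (by omega)]
    have hk : max l1.length l2.length - min l1.length l2.length = l1.length - min l1.length l2.length := by omega
    rw [hk]
    congr 1
    apply List.map_congr_left
    intro i hi
    have := (List.mem_range'_1.mp hi)
    have h1 : i < l1.length := by omega
    simp [h1]
  · by_cases hlt : l1.length < l2.length
    · rw [if_neg hgt, if_pos hlt]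
      have hmin : min l1.length l2.length = l1.length := by omega
      rw [pv_tail2 _ l1 l2 _ _ hmin (by omega)]
      have hk : max l1.length l2.length - min l1.length l2.length = l2.length - min l1.length l2.length := by omega
      rw [hk]
      congr 1
      apply List.map_congr_left
      intro i hi
      have := (List.mem_range'_1.mp hi)
      have h2 : i < l2.length := by omega
      simp [h2]
    · rw [if_neg hgt, if_neg hlt]
      have hk : max l1.length l2.length - min l1.length l2.length = 0 := by omega
      rw [hk]
      simp
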